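-- pv_equiv track=rewrite | github.com/Cut3st/learning_python | learning/test_basic.py | is_school_balanced
-- ===== SOURCE A (Python) =====
-- def is_school_balanced(team):
--     if len(team) == 0:
--         return True
--     max_allowed = (len(team) // 2) + 1
--     school_count = count_schools(team)
--     for count in school_count.values():
--         if count > max_allowed:
--             return False
--     return True
--
-- def count_schools(team):
--     school_count = {}
--     for student in team:
--         school = student['school']
--         if school not in school_count:
--             school_count[school] = 0
--         school_count[school] += 1
--     return school_count
-- ===== SOURCE B (Python) =====
-- def is_school_balanced(team):
--     schools = [student['school'] for student in team]
--     if not schools: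
--         return True
--     # Boyer-Moore majority vote: only a strict-majority school can exceed
--     # len(team)//2 + 1, and if one exists it ends up as the candidate.
--     cand = schools[0]
--     votes = 0
--     for x in schools:
--         if votes == 0:
--             cand = x
--             votes = 1
--         elif x == cand:
--             votes += 1
--         else:
--             votes -= 1
--     return schools.count(cand) <= len(team) // 2 + 1
-- ===== Notes on version B (the rewrite author's own statement) =====
-- stated objective: alternative
-- what changed: Replaces the per-school hash-table counting with the Boyer-Moore majority-vote algorithm: any school exceeding len(team)//2 + 1 is a strict majority, so at most one candidate can violate the bound; B finds it in O(1) extra space and checks only that one count.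
import Mathlib
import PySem

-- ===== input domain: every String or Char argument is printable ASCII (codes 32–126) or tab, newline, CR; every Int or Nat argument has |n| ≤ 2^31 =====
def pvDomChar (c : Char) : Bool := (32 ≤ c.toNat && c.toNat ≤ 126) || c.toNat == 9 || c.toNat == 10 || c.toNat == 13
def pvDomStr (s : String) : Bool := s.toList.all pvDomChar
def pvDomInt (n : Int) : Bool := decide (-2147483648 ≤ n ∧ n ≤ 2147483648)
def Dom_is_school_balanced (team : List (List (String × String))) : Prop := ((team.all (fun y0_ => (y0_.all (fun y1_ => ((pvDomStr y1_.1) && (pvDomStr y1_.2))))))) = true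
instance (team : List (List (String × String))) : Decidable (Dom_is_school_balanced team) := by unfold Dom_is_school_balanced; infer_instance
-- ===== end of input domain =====

-- B replaces the per-school hash-table counting by the Boyer–Moore majority vote:
-- a school exceeding len(team)//2 + 1 is a strict majority, so only the vote's
-- candidate can violate the bound, and one count of it decides.

-- ===== PORT A =====
-- count_schools: builds the dict; none = KeyError on student['school']
def aCount : List (List (String × String)) → PySem.Dict String Int → Option (PySem.Dict String Int)
  | [], d => some d
  | s :: rest, d =>
    match (PySem.Dict.mk s).get? "school" with
    | none => none
    | some school =>
      let d := if d.contains school then d else d.insert school 0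
      aCount rest (d.insert school (((d.get? school).getD 0) + 1))

-- 'for count in school_count.values(): if count > max_allowed: return False'
def aCheck : List Int → Int → Bool
  | [], _ => true
  | c :: rest, m => if c > m then false else aCheck rest m

def is_school_balanced (team : List (List (String × String))) : Bool :=
  if team.length = 0 then true
  else
    let max_allowed := PySem.Int.floordiv (team.length : Int) 2 + 1
    match aCount team PySem.Dict.empty with
    | none => true  -- KeyError in Python; excluded by Pre_
    | some school_count => aCheck school_count.values max_allowed

-- ===== PORT B =====
-- schools = [student['school'] for student in team]; none = KeyError
def bSchools : List (List (String × String)) → Option (List String)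
  | [] => some []
  | s :: rest =>
    match (PySem.Dict.mk s).get? "school" with
    | none => none
    | some sch =>
      match bSchools rest with
      | none => none
      | some l => some (sch :: l)

-- the Boyer–Moore vote loop over schools, state (cand, votes)
def bmLoop : List String → String → Int → String × Int
  | [], cand, votes => (cand, votes)
  | x :: rest, cand, votes =>
    if votes = 0 then bmLoop rest x 1
    else if x = cand then bmLoop rest cand (votes + 1)
    else bmLoop rest cand (votes - 1)

def is_school_balanced_alt (team : List (List (String × String))) : Bool :=
  match bSchools team with
  | none => true  -- KeyError in Python; excluded by Pre_
  | some schools =>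
    match schools with
    | [] => true
    | s0 :: _ =>
      let st := bmLoop schools s0 0
      decide (PySem.List.count schools st.1 ≤ PySem.Int.floordiv (team.length : Int) 2 + 1)

-- ===== PRECONDITION & SPEC =====
-- Pre_ excludes exactly the inputs where student['school'] raises KeyError (in both A and B).
def Pre_is_school_balanced (team : List (List (String × String))) : Prop :=
  ∀ s ∈ team, ((PySem.Dict.mk s).get? "school").isSome = true
instance (team : List (List (String × String))) : Decidable (Pre_is_school_balanced team) := by unfold Pre_is_school_balanced; infer_instance

def pvWitness_is_school_balanced : (List (List (String × String))) :=
  [[("school", "a")], [("name", "x"), ("school", "b")], [("school", "a")]]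

def Spec_is_school_balanced (team : List (List (String × String))) (out : Bool) : Prop := out = is_school_balanced_alt team
instance (team : List (List (String × String))) (out : Bool) : Decidable (Spec_is_school_balanced team out) := by unfold Spec_is_school_balanced; infer_instance

-- ===== CLAIM =====
def Claim_equal_is_school_balanced : Prop := ∀ (team : List (List (String × String))), Dom_is_school_balanced team → Pre_is_school_balanced team → Spec_is_school_balanced team (is_school_balanced team)

-- ===== LEMMAS AND PROOFS =====

-- the school of one student (under Pre_, get? is some)
def sch0 (s : List (String × String)) : String := ((PySem.Dict.mk s).get? "school").getD ""

lemma bSchools_eq (ts : List (List (String × String)))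
    (h : ∀ s ∈ ts, ((PySem.Dict.mk s).get? "school").isSome = true) :
    bSchools ts = some (ts.map sch0) := by
  induction ts with
  | nil => rfl
  | cons s rest ih =>
    obtain ⟨school, hs⟩ := Option.isSome_iff_exists.mp (h s (List.mem_cons_self))
    simp only [bSchools, hs, ih (fun x hx => h x (List.mem_cons_of_mem _ hx)),
      List.map_cons, sch0, Option.getD_some]

lemma aCount_eq (ts : List (List (String × String))) (d : PySem.Dict String Int)
    (h : ∀ s ∈ ts, ((PySem.Dict.mk s).get? "school").isSome = true) :
    aCount ts d = some ((ts.map sch0).foldl (fun d x => d.insert x (d.getD x 0 + 1)) d) := by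
  induction ts generalizing d with
  | nil => rfl
  | cons s rest ih =>
    obtain ⟨school, hs⟩ := Option.isSome_iff_exists.mp (h s (List.mem_cons_self))
    have hsch : sch0 s = school := by simp [sch0, hs]
    simp only [aCount, hs, List.map_cons, List.foldl_cons, hsch]
    rw [ih _ (fun x hx => h x (List.mem_cons_of_mem _ hx))]
    congr 2
    by_cases hc : d.contains school = true
    · simp [hc, ← PySem.Dict.getD_eq_get?_getD]
    · simp only [PySem.Dict.getD_of_not_contains d (by simpa using hc) (d0 := 0)]
      rw [if_neg (by simp [hc]), PySem.Dict.insert_insert_self]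
      norm_num

lemma aCheck_iff (vals : List Int) (m : Int) :
    aCheck vals m = true ↔ ∀ c ∈ vals, c ≤ m := by
  induction vals with
  | nil => simp [aCheck]
  | cons c rest ih =>
    by_cases h : c > m
    · simp only [aCheck, if_pos h, Bool.false_eq_true, false_iff]
      intro hall
      exact absurd (hall c List.mem_cons_self) (not_le.mpr h)
    · simp [aCheck, if_neg h, ih, not_lt.mp h]

-- A is true iff every school's count is within the bound (counts of non-members are 0 ≤ m since 0 < m)
lemma a_iff (schools : List String) (m : Int) (hm : 0 < m) :
    aCheck (PySem.Dict.counter schools).values m = true ↔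
      ∀ x : String, (schools.count x : Int) ≤ m := by
  rw [aCheck_iff]
  constructor
  · intro hall x
    by_cases hmem : x ∈ schools
    · apply hall
      simp only [PySem.Dict.values, PySem.Dict.items_counter, List.map_map]
      exact List.mem_map.mpr ⟨x, by simpa [PySem.Set.mem_ofList] using hmem, rfl⟩
    · rw [List.count_eq_zero_of_not_mem hmem]; exact_mod_cast hm.le
  · intro hall c hc
    simp only [PySem.Dict.values, PySem.Dict.items_counter, List.map_map] at hc
    obtain ⟨x, _, rfl⟩ := List.mem_map.mp hc
    exact hall x

-- Boyer–Moore invariant. bias x (cand, votes) = votes if x is the candidate, else -votes;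
-- it rises by at least 2·[x = e] - 1 at every step, and votes stays ≥ 0.
def bias (x cand : String) (v : Int) : Int := if x = cand then v else -v

lemma bm_inv (l : List String) : ∀ (cand : String) (votes : Int) (x : String), 0 ≤ votes →
    0 ≤ (bmLoop l cand votes).2 ∧
    2 * (l.count x : Int) + bias x cand votes
      ≤ l.length + bias x (bmLoop l cand votes).1 (bmLoop l cand votes).2 := by
  induction l with
  | nil => intro cand votes x h0; exact ⟨h0, by simp [bmLoop]⟩
  | cons e rest ih =>
    intro cand votes x h0
    have hcnt : (((e :: rest).count x : Nat) : Int)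
        = (rest.count x : Int) + (if x = e then 1 else 0) := by
      by_cases hx : x = e
      · subst hx; simp [List.count_cons_self]
      · simp [List.count_cons_of_ne (fun h => hx h.symm), hx]
    by_cases hv : votes = 0
    · subst hv
      rw [show bmLoop (e :: rest) cand 0 = bmLoop rest e 1 from by simp [bmLoop]]
      obtain ⟨h1, h2⟩ := ih e 1 x (by omega)
      refine ⟨h1, ?_⟩
      have hb0 : bias x cand 0 = 0 := by unfold bias; split_ifs <;> ring
      have hbx : bias x e 1 = if x = e then 1 else -1 := by unfold bias; split_ifs <;> ring
      rw [hbx] at h2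
      rw [hcnt, hb0, List.length_cons]
      split_ifs at h2 ⊢ <;> push_cast at * <;> omega
    · by_cases he : e = cand
      · subst he
        rw [show bmLoop (e :: rest) e votes = bmLoop rest e (votes + 1) from by
          simp [bmLoop, hv]]
        obtain ⟨h1, h2⟩ := ih e (votes + 1) x (by omega)
        refine ⟨h1, ?_⟩
        have hb : bias x e (votes + 1) = bias x e votes + (if x = e then 1 else -1) := by
          unfold bias; split_ifs <;> ring
        rw [hb] at h2
        rw [hcnt, List.length_cons]
        split_ifs at h2 ⊢ <;> push_cast at * <;> omega
      · rw [show bmLoop (e :: rest) cand votes = bmLoop rest cand (votes - 1) from by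
          simp [bmLoop, hv, he]]
        obtain ⟨h1, h2⟩ := ih cand (votes - 1) x (by omega)
        refine ⟨h1, ?_⟩
        have hb : bias x cand (votes - 1) = bias x cand votes - (if x = cand then 1 else -1) := by
          unfold bias; split_ifs <;> ring
        rw [hb] at h2
        rw [hcnt, List.length_cons]
        by_cases hx : x = e
        · subst hx
          rw [if_neg he] at h2
          rw [if_pos rfl]
          push_cast at *; omega
        · rw [if_neg hx]
          by_cases hxc : x = cand
          · rw [if_pos hxc] at h2; push_cast at *; omega
          · rw [if_neg hxc] at h2; push_cast at *; omega

-- any non-candidate occurs at most ⌊n/2⌋ times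
lemma bm_minority (l : List String) (s0 x : String)
    (hx : x ≠ (bmLoop l s0 0).1) : 2 * (l.count x : Int) ≤ l.length := by
  obtain ⟨h1, h2⟩ := bm_inv l s0 0 x le_rfl
  unfold bias at h2
  rw [if_neg hx] at h2
  split_ifs at h2 <;> omega

-- ===== VERDICT =====
theorem is_school_balanced_spec : Claim_equal_is_school_balanced := by
  intro team _ hpre
  unfold Spec_is_school_balanced is_school_balanced is_school_balanced_alt
  rw [bSchools_eq team hpre, aCount_eq team PySem.Dict.empty hpre,
    PySem.Dict.foldl_insert_getD_add_one_eq_counter]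
  cases team with
  | nil => rfl
  | cons t ts =>
    simp only [List.map_cons, List.length_cons]
    rw [if_neg (by omega)]
    set schools := sch0 t :: ts.map sch0 with hsch
    set m := PySem.Int.floordiv ((ts.length + 1 : Nat) : Int) 2 + 1 with hm
    have hfd : PySem.Int.floordiv ((ts.length + 1 : Nat) : Int) 2
        = ((ts.length + 1 : Nat) : Int) / 2 :=
      PySem.Int.floordiv_eq_ediv_of_pos (by omega)
    have hm0 : 0 < m := by rw [hm, hfd]; omega
    rw [Bool.eq_iff_iff, a_iff schools m hm0, decide_eq_true_iff]
    simp only [PySem.List.count_eq]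
    constructor
    · intro h; exact h _
    · intro h x
      by_cases hx : x = (bmLoop schools (sch0 t) 0).1
      · rw [hx]; exact h
      · have h2 := bm_minority schools (sch0 t) x hx
        have hlen : schools.length = ts.length + 1 := by simp [hsch]
        rw [hlen] at h2
        rw [hm, hfd]
        omega
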